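-- pv_equiv track=rewrite | github.com/Natasthedog/excel_auto | app.py | _two_row_column_match
-- ===== SOURCE A (Python) =====
-- def _normalize_column_name(value: str) -> str:
--     return "".join(ch for ch in value.strip().lower() if ch.isalnum())
--
-- def _two_row_column_match(
--     group_value: str,
--     sub_value: str,
--     candidates: list[str],
-- ) -> bool:
--     group_key = _normalize_column_name(group_value)
--     sub_key = _normalize_column_name(sub_value)
--     candidate_keys = {_normalize_column_name(candidate) for candidate in candidates}
--     return group_key in candidate_keys or sub_key in candidate_keys
-- ===== SOURCE B (Python) =====
-- def _normalized_key(value: str) -> str: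
--     """Build the normalized form with an explicit accumulator loop:
--     lower each char and keep it iff it is alphanumeric (stripping is
--     unnecessary since whitespace is never alphanumeric)."""
--     out = []
--     for ch in value:
--         c = ch.lower()
--         if c.isalnum():
--             out.append(c)
--     return "".join(out)
--
--
-- def _stream_match(candidate: str, key: str) -> bool:
--     """Check candidate's normalized form equals key WITHOUT building it:
--     walk candidate, lowering each char, and advance a pointer into key
--     on every alphanumeric char; match iff key is consumed exactly."""
--     i = 0
--     for ch in candidate:
--         c = ch.lower()
--         if c.isalnum():
--             if i >= len(key) or key[i] != c:
--                 return False
--             i += 1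
--     return i == len(key)
--
--
-- def _two_row_column_match(
--     group_value: str,
--     sub_value: str,
--     candidates: list[str],
-- ) -> bool:
--     group_key = _normalized_key(group_value)
--     sub_key = _normalized_key(sub_value)
--     for candidate in candidates:
--         if _stream_match(candidate, group_key) or _stream_match(candidate, sub_key):
--             return True
--     return False
-- ===== Notes on version B (the rewrite author's own statement) =====
-- stated objective: alternative
-- what changed: Instead of normalizing every candidate into a string and collecting the normalized forms in a set to probe, B streams each candidate against the two pre-normalized keys with a pointer into the key (two-pointer match that aborts on first mismatch), so no normalized candidate string and no set are ever built, and the scan short-circuits on the first matching candidate.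
import Mathlib
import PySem

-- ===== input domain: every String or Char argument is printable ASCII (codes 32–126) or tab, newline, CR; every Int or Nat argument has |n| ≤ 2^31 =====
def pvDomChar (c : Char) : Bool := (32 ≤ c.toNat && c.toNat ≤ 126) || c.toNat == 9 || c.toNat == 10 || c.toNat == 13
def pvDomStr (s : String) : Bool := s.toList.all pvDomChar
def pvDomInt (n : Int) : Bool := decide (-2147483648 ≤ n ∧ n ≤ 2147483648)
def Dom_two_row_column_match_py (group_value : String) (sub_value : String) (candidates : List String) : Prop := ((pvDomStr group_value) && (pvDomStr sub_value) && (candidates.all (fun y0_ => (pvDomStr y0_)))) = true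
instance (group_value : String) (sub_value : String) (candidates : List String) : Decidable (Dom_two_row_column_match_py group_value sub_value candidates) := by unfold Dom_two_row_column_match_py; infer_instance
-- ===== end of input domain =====

-- B: streams each candidate against the two pre-normalized keys with a pointer into the key (two-pointer match, no normalized candidate strings and no set); alternative structure, same cost.


-- ===== PORT A =====
-- _normalize_column_name: strip, lower, keep alnum chars
def pvNormalize (value : String) : String :=
  String.ofList (((PySem.Str.lower (PySem.Str.strip value)).toList).filter PySem.Chars.isalnum)

def two_row_column_match_py (group_value : String) (sub_value : String) (candidates : List String) : Bool :=
  let group_key := pvNormalize group_value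
  let sub_key := pvNormalize sub_value
  let candidate_keys : PySem.Set String := PySem.Set.ofList (candidates.map pvNormalize)
  PySem.Set.contains candidate_keys group_key || PySem.Set.contains candidate_keys sub_key

-- ===== PORT B =====
-- _normalized_key: accumulator loop, lower each char, keep it iff alnum (no strip)
def pvNormKey (value : String) : String :=
  String.ofList (value.toList.foldl
    (fun out ch =>
      let c := PySem.Chars.lowerChar ch
      if PySem.Chars.isalnum c then out ++ [c] else out) [])

-- _stream_match: walk the candidate, lowering each char; advance a pointer into key
-- on every alnum char (here: structural recursion consuming the key list)
def pvStreamMatch : List Char → List Char → Bool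
  | [], key => key.isEmpty
  | ch :: rest, key =>
    let c := PySem.Chars.lowerChar ch
    if PySem.Chars.isalnum c then
      match key with
      | [] => false
      | k :: ks => if k == c then pvStreamMatch rest ks else false
    else pvStreamMatch rest key

def two_row_column_match_py_alt (group_value : String) (sub_value : String) (candidates : List String) : Bool :=
  let group_key := pvNormKey group_value
  let sub_key := pvNormKey sub_value
  candidates.any (fun candidate =>
    pvStreamMatch candidate.toList group_key.toList || pvStreamMatch candidate.toList sub_key.toList)

-- ===== PRECONDITION & SPEC =====
def Spec_two_row_column_match_py (group_value : String) (sub_value : String) (candidates : List String) (out : Bool) : Prop := out = two_row_column_match_py_alt group_value sub_value candidates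
instance (group_value : String) (sub_value : String) (candidates : List String) (out : Bool) : Decidable (Spec_two_row_column_match_py group_value sub_value candidates out) := by unfold Spec_two_row_column_match_py; infer_instance

-- ===== CLAIM (what is proved, stated in full; the proofs are below) =====
def Claim_equal_two_row_column_match_py : Prop := ∀ (group_value : String) (sub_value : String) (candidates : List String), Dom_two_row_column_match_py group_value sub_value candidates → Spec_two_row_column_match_py group_value sub_value candidates (two_row_column_match_py group_value sub_value candidates)

-- ===== LEMMAS AND PROOFS =====

-- the normalized form of a char list: lower every char, keep the alnum ones
def pvNormFilter (l : List Char) : List Char :=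
  (l.map PySem.Chars.lowerChar).filter PySem.Chars.isalnum

theorem pv_isspace_not_alnum (c : Char) (h : PySem.Chars.isspace c = true) :
    PySem.Chars.isalnum (PySem.Chars.lowerChar c) = false := by
  simp only [PySem.Chars.isspace, Bool.or_eq_true, Bool.and_eq_true, decide_eq_true_eq] at h
  have hle : ∀ a b : Char, (a ≤ b) ↔ a.toNat ≤ b.toNat := fun a b => ge_iff_le
  have hup : PySem.Chars.isupper c = false := by
    simp only [PySem.Chars.isupper, Bool.and_eq_false_iff, decide_eq_false_iff_not, hle]
    show ¬ (65 ≤ c.toNat) ∨ ¬ (c.toNat ≤ 90)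
    omega
  simp only [PySem.Chars.lowerChar, hup, Bool.false_eq_true, if_false]
  simp only [PySem.Chars.isalnum, PySem.Chars.isalpha, PySem.Chars.islower, PySem.Chars.isdigit,
    hup, Bool.false_or, Bool.or_eq_false_iff, Bool.and_eq_false_iff, decide_eq_false_iff_not, hle]
  show (¬ (97 ≤ c.toNat) ∨ ¬ (c.toNat ≤ 122)) ∧ (¬ (48 ≤ c.toNat) ∨ ¬ (c.toNat ≤ 57))
  omega

theorem pv_normFilter_dropWhile (l : List Char) :
    pvNormFilter (l.dropWhile PySem.Chars.isspace) = pvNormFilter l := by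
  induction l with
  | nil => rfl
  | cons h t ih =>
    by_cases hs : PySem.Chars.isspace h = true
    · rw [List.dropWhile_cons_of_pos hs, ih]
      simp [pvNormFilter, pv_isspace_not_alnum h hs]
    · rw [List.dropWhile_cons_of_neg hs]

theorem pv_normFilter_reverse (l : List Char) :
    pvNormFilter l.reverse = (pvNormFilter l).reverse := by
  simp [pvNormFilter, List.filter_reverse]

theorem pv_normFilter_strip (l : List Char) :
    pvNormFilter (PySem.Chars.strip l) = pvNormFilter l := by
  unfold PySem.Chars.strip PySem.Chars.rstrip PySem.Chars.lstrip
  rw [pv_normFilter_reverse, pv_normFilter_dropWhile, pv_normFilter_reverse,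
    List.reverse_reverse, pv_normFilter_dropWhile]

theorem pv_normalize_toList (s : String) :
    (pvNormalize s).toList = pvNormFilter s.toList := by
  simp [pvNormalize, PySem.Str.toList_lower, PySem.Str.toList_strip, PySem.Chars.lower]
  rw [← pvNormFilter, pv_normFilter_strip]

theorem pv_normKey_loop (l : List Char) (acc : List Char) :
    l.foldl (fun out ch =>
      let c := PySem.Chars.lowerChar ch
      if PySem.Chars.isalnum c then out ++ [c] else out) acc = acc ++ pvNormFilter l := by
  induction l generalizing acc with
  | nil => simp [pvNormFilter]
  | cons h t ih =>
    simp only [List.foldl_cons, ih, pvNormFilter, List.map_cons, List.filter_cons]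
    by_cases ha : PySem.Chars.isalnum (PySem.Chars.lowerChar h) = true <;> simp [ha]

theorem pv_normKey_toList (s : String) :
    (pvNormKey s).toList = pvNormFilter s.toList := by
  simp [pvNormKey, pv_normKey_loop]

theorem pv_streamMatch_eq (cs key : List Char) :
    pvStreamMatch cs key = (pvNormFilter cs == key) := by
  induction cs generalizing key with
  | nil => cases key <;> simp [pvStreamMatch, pvNormFilter]
  | cons ch rest ih =>
    by_cases ha : PySem.Chars.isalnum (PySem.Chars.lowerChar ch) = true
    · cases key with
      | nil => simp [pvStreamMatch, pvNormFilter, ha]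
      | cons k ks =>
        simp only [pvStreamMatch, ha, if_true, pvNormFilter, List.map_cons,
          List.filter_cons, List.cons_beq_cons]
        by_cases hk : k = PySem.Chars.lowerChar ch
        · simp [hk, ih, pvNormFilter, BEq.comm]
        · have : (PySem.Chars.lowerChar ch == k) = false := by simp [Ne.symm hk]
          simp [hk, this]
    · simp [pvStreamMatch, ha, ih, pvNormFilter]

theorem pv_streamMatch_normalize (c v : String) :
    pvStreamMatch c.toList (pvNormKey v).toList = (pvNormalize c == pvNormalize v) := by
  rw [pv_streamMatch_eq, pv_normKey_toList]
  rw [Bool.eq_iff_iff, beq_iff_eq, beq_iff_eq]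
  constructor
  · intro h
    apply String.toList_inj.mp
    rw [pv_normalize_toList, pv_normalize_toList, h]
  · intro h
    have := congrArg String.toList h
    rw [pv_normalize_toList, pv_normalize_toList] at this
    rw [this]

-- ===== VERDICT (by name: the statement is the Claim_ definition above) =====
theorem two_row_column_match_py_spec : Claim_equal_two_row_column_match_py := by
  intro g s cs _
  unfold Spec_two_row_column_match_py two_row_column_match_py two_row_column_match_py_alt
  rw [Bool.eq_iff_iff]
  simp only [PySem.Set.contains_iff, PySem.Set.mem_ofList, List.mem_map, List.any_eq_true,
    Bool.or_eq_true, pv_streamMatch_normalize, beq_iff_eq]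
  constructor
  · rintro (⟨c, hc, h⟩ | ⟨c, hc, h⟩)
    · exact ⟨c, hc, Or.inl h⟩
    · exact ⟨c, hc, Or.inr h⟩
  · rintro ⟨c, hc, h | h⟩
    · exact Or.inl ⟨c, hc, h⟩
    · exact Or.inr ⟨c, hc, h⟩
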